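-- pv_equiv track=rewrite | github.com/finreflectkg/FinReflectKG-MultiHop | dataset_generation/gics_loader.py | get_companies_by_sub_industry
-- ===== SOURCE A (Python) =====
-- from typing import Dict, List, Optional
--
-- def get_companies_by_sub_industry(gics_data: Dict[str, Dict[str, str]]) -> Dict[str, List[str]]:
--     """
--     Group companies by their GICS sub-industry.
--
--     Args:
--         gics_data: Output from load_sp100_gics()
--
--     Returns:
--         Dictionary mapping sub-industry to list of tickers:
--         {
--             'Semiconductors': ['NVDA', 'AMD', 'INTC', ...],
--             'Diversified Banks': ['JPM', 'BAC', 'WFC', ...],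
--             ...
--         }
--     """
--     sub_industries = {}
--     for ticker, info in gics_data.items():
--         sub_ind = info['sub_industry']
--         if sub_ind not in sub_industries:
--             sub_industries[sub_ind] = []
--         sub_industries[sub_ind].append(ticker)
--
--     # Sort tickers within each sub-industry
--     for sub_ind in sub_industries:
--         sub_industries[sub_ind].sort()
--
--     return sub_industries
-- ===== SOURCE B (Python) =====
-- def get_companies_by_sub_industry(gics_data):
--     # Single grouping pass that keeps every bucket sorted as it grows
--     # (ordered insertion), so no per-group sort pass is needed at the end.
--     sub_industries = {}
--     for ticker, info in gics_data.items():
--         bucket = sub_industries.setdefault(info['sub_industry'], [])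
--         i = 0
--         while i < len(bucket) and bucket[i] <= ticker:
--             i += 1
--         bucket.insert(i, ticker)
--     return sub_industries
-- ===== Notes on version B (the rewrite author's own statement) =====
-- stated objective: alternative
-- what changed: Instead of appending tickers into per-sub-industry buckets and sorting every bucket in a second pass, B keeps each bucket sorted at all times by inserting every ticker at its ordered position during the single grouping pass, so the final sort loop disappears.
import Mathlib
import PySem

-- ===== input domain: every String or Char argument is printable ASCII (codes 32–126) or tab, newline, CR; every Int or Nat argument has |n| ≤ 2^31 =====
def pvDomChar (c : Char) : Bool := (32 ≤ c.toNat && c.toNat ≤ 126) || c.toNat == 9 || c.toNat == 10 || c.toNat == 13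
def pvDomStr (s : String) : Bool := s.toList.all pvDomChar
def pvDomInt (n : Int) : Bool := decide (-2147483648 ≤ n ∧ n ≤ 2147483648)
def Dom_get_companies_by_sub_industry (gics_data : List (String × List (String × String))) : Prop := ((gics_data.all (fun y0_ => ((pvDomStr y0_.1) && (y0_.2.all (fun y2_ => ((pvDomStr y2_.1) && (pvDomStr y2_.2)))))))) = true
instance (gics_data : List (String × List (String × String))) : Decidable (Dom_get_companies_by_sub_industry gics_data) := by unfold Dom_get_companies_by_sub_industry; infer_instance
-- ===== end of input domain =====

-- B keeps each bucket sorted by ordered insertion during the single grouping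
-- pass instead of A's append-then-sort-every-bucket second pass ('alternative').
-- (A mutates nothing observable; both sides are pure in the return value.)

-- ===== PORT A =====
def get_companies_by_sub_industry (gics_data : List (String × List (String × String))) : List (String × List String) :=
  -- for ticker, info in gics_data.items(): group, then sort each bucket
  let d := (PySem.Dict.ofList gics_data).items.foldl (fun d p =>
      let sub := (PySem.Dict.ofList p.2).getD "sub_industry" ""   -- info['sub_industry']; Pre_ guarantees the key is present
      let d1 := if d.contains sub then d else d.insert sub ([] : List String)
      d1.insert sub (d1.getD sub [] ++ [p.1])) PySem.Dict.empty
  -- for sub_ind in sub_industries: sub_industries[sub_ind].sort()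
  let d2 := d.keys.foldl (fun d' k => d'.insert k (PySem.List.sorted (d'.getD k []) (fun v => v) false)) d
  d2.items

-- ===== PORT B =====
-- while i < len(bucket) and bucket[i] <= ticker: i += 1; bucket.insert(i, ticker)
-- (left scan to the first element greater than ticker, insert there)
def pvInsertSorted (bucket : List String) (ticker : String) : List String :=
  match bucket with
  | [] => [ticker]
  | y :: rest => if y ≤ ticker then y :: pvInsertSorted rest ticker else ticker :: y :: rest

def get_companies_by_sub_industry_alt (gics_data : List (String × List (String × String))) : List (String × List String) :=
  ((PySem.Dict.ofList gics_data).items.foldl (fun d p =>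
      let sub := (PySem.Dict.ofList p.2).getD "sub_industry" ""   -- info['sub_industry']
      d.insert sub (pvInsertSorted (d.getD sub []) p.1)) PySem.Dict.empty).items

-- ===== PRECONDITION & SPEC =====
-- Pre_ excludes exactly the inputs on which A raises KeyError: some company's
-- info dict has no 'sub_industry' key (B raises there too).
def Pre_get_companies_by_sub_industry (gics_data : List (String × List (String × String))) : Prop :=
  ∀ p ∈ (PySem.Dict.ofList gics_data).items, (PySem.Dict.ofList p.2).contains "sub_industry" = true
instance (gics_data : List (String × List (String × String))) : Decidable (Pre_get_companies_by_sub_industry gics_data) := by unfold Pre_get_companies_by_sub_industry; infer_instance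

def pvWitness_get_companies_by_sub_industry : (List (String × List (String × String))) :=
  [("NVDA", [("sub_industry", "Semiconductors")]), ("JPM", [("sub_industry", "Diversified Banks")]),
   ("AMD", [("sub_industry", "Semiconductors")])]

def Spec_get_companies_by_sub_industry (gics_data : List (String × List (String × String))) (out : List (String × List String)) : Prop := out = get_companies_by_sub_industry_alt gics_data
instance (gics_data : List (String × List (String × String))) (out : List (String × List String)) : Decidable (Spec_get_companies_by_sub_industry gics_data out) := by unfold Spec_get_companies_by_sub_industry; infer_instance

-- ===== CLAIM (what is proved, stated in full; the proofs are below) =====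
def Claim_equal_get_companies_by_sub_industry : Prop := ∀ (gics_data : List (String × List (String × String))), Dom_get_companies_by_sub_industry gics_data → Pre_get_companies_by_sub_industry gics_data → Spec_get_companies_by_sub_industry gics_data (get_companies_by_sub_industry gics_data)

-- ===== LEMMAS AND PROOFS =====

-- B's ordered insertion is PySem's insertion-sort step.
theorem pvInsertSorted_eq_insertBy (x : String) (bucket : List String) :
    pvInsertSorted bucket x = PySem.List.insertBy (fun a b => decide (a < b)) x bucket := by
  induction bucket with
  | nil => rfl
  | cons y rest ih =>
    simp only [pvInsertSorted, PySem.List.insertBy, ih]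
    by_cases h : y ≤ x
    · simp [h, not_lt_of_ge h]
    · simp [h, lt_of_not_ge h]

theorem foldl_pvInsertSorted_eq_sorted (xs : List String) :
    xs.foldl pvInsertSorted [] = PySem.List.sorted xs (fun v => v) false := by
  rw [PySem.List.sorted_eq_foldl_insertBy]
  exact PySem.List.foldl_congr_mem xs _ _ _ (fun acc x _ => pvInsertSorted_eq_insertBy x acc)

-- the sub-industry of one entry
def pvKey (p : String × List (String × String)) : String :=
  (PySem.Dict.ofList p.2).getD "sub_industry" ""

-- A's loop body is dict.modify (append).
theorem pvStepA_eq_modify (d : PySem.Dict String (List String)) (p : String × List (String × String)) :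
    (let sub := pvKey p
     let d1 := if d.contains sub then d else d.insert sub ([] : List String)
     d1.insert sub (d1.getD sub [] ++ [p.1]))
    = d.modify (pvKey p) [] (· ++ [p.1]) := by
  by_cases h : d.contains (pvKey p) = true
  · simp [h, PySem.Dict.modify]
  · simp only [eq_false_of_ne_true h, Bool.false_eq_true, if_false, PySem.Dict.modify]
    rw [PySem.Dict.getD_insert_self, PySem.Dict.insert_insert_self,
      PySem.Dict.getD_of_not_contains _ _ (eq_false_of_ne_true h)]

-- value of A's grouping dict at any key
theorem pvFoldA_getD (l : List (String × List (String × String))) (c : String) :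
    (l.foldl (fun d p => d.modify (pvKey p) [] (· ++ [p.1])) PySem.Dict.empty).getD c []
      = ((l.filter (fun p => pvKey p == c)).map (·.1)) := by
  have h := PySem.Dict.getD_foldl_modify_append (l.map (fun p => (pvKey p, p.1))) PySem.Dict.empty c
  rw [List.foldl_map] at h
  simpa [List.filter_map, Function.comp] using h

-- value of B's dict at any key: the group's tickers folded through ordered insertion
theorem pvFoldB_getD (l : List (String × List (String × String))) (d : PySem.Dict String (List String)) (c : String) :
    (l.foldl (fun d p => d.insert (pvKey p) (pvInsertSorted (d.getD (pvKey p) []) p.1)) d).getD c []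
      = ((l.filter (fun p => pvKey p == c)).map (·.1)).foldl pvInsertSorted (d.getD c []) := by
  induction l generalizing d with
  | nil => rfl
  | cons p rest ih =>
    simp only [List.foldl_cons, List.filter_cons]
    by_cases h : pvKey p = c
    · simp only [h, beq_self_eq_true, if_pos trivial, List.map_cons, List.foldl_cons, ih,
        PySem.Dict.getD_insert_self]
    · have hb : (pvKey p == c) = false := by simp [h]
      simp only [hb, Bool.false_eq_true, if_false, ih,
        PySem.Dict.getD_insert_of_ne _ _ _ (fun hc => h hc.symm)]

-- A's final sort loop: keys unchanged, every listed bucket sorted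
theorem pvSortLoop (ks : List String) (d : PySem.Dict String (List String))
    (hnd : d.keys.Nodup) (hks : ∀ k ∈ ks, d.contains k = true) :
    (ks.foldl (fun d' k => d'.insert k (PySem.List.sorted (d'.getD k []) (fun v => v) false)) d).keys = d.keys
    ∧ ∀ c, (ks.foldl (fun d' k => d'.insert k (PySem.List.sorted (d'.getD k []) (fun v => v) false)) d).getD c []
        = if c ∈ ks then PySem.List.sorted (d.getD c []) (fun v => v) false else d.getD c [] := by
  induction ks generalizing d with
  | nil => simp
  | cons k ks ih =>
    have hk : d.contains k = true := hks k (by simp)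
    set d1 := d.insert k (PySem.List.sorted (d.getD k []) (fun v => v) false) with hd1
    have hkeys1 : d1.keys = d.keys := PySem.Dict.keys_insert_of_contains _ _ hk
    have hnd1 : d1.keys.Nodup := by rw [hkeys1]; exact hnd
    have hks1 : ∀ j ∈ ks, d1.contains j = true := by
      intro j hj
      rw [hd1, PySem.Dict.contains_insert]
      simp [hks j (List.mem_cons_of_mem _ hj)]
    obtain ⟨hKeys, hGet⟩ := ih d1 hnd1 hks1
    constructor
    · simpa [hkeys1] using hKeys
    · intro c
      rw [List.foldl_cons, ← hd1, hGet c]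
      by_cases hc : c = k
      · subst hc
        by_cases hmem : c ∈ ks
        · simp [hmem, hd1, PySem.Dict.getD_insert_self, PySem.List.sorted_sorted]
        · simp [hmem, hd1, PySem.Dict.getD_insert_self]
      · have : d1.getD c [] = d.getD c [] := PySem.Dict.getD_insert_of_ne _ _ _ hc
        by_cases hmem : c ∈ ks
        · simp [hmem, this, List.mem_cons, hc]
        · simp [hmem, this, List.mem_cons, hc]

-- ===== VERDICT (by name: the statement is the Claim_ definition above) =====
theorem get_companies_by_sub_industry_spec : Claim_equal_get_companies_by_sub_industry := by
  intro gics_data _ _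
  unfold Spec_get_companies_by_sub_industry
  unfold get_companies_by_sub_industry get_companies_by_sub_industry_alt
  set l := (PySem.Dict.ofList gics_data).items with hl
  -- A's grouping fold in modify form
  have hA : (l.foldl (fun d p =>
      let sub := (PySem.Dict.ofList p.2).getD "sub_industry" ""
      let d1 := if d.contains sub then d else d.insert sub ([] : List String)
      d1.insert sub (d1.getD sub [] ++ [p.1])) PySem.Dict.empty)
      = (l.foldl (fun d p => d.modify (pvKey p) [] (· ++ [p.1])) PySem.Dict.empty) :=
    PySem.List.foldl_congr_mem l _ _ _ (fun d p _ => pvStepA_eq_modify d p)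
  set dA := l.foldl (fun d p => d.modify (pvKey p) [] (· ++ [p.1])) PySem.Dict.empty with hdA
  set dB := l.foldl (fun d p => d.insert (pvKey p) (pvInsertSorted (d.getD (pvKey p) []) p.1)) PySem.Dict.empty with hdB
  -- both dicts list the same keys, without duplicates
  have hndE : (PySem.Dict.empty : PySem.Dict String (List String)).keys.Nodup := by
    simp [PySem.Dict.keys_empty]
  have hKA : dA.keys = PySem.Set.update (PySem.Dict.empty : PySem.Dict String (List String)).keys (l.map pvKey) :=
    PySem.Dict.keys_foldl_modify_key l pvKey [] (fun _ p => (· ++ [p.1])) PySem.Dict.empty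
  have hKB : dB.keys = PySem.Set.update (PySem.Dict.empty : PySem.Dict String (List String)).keys (l.map pvKey) :=
    PySem.Dict.keys_foldl_insert_key l pvKey (fun d p => pvInsertSorted (d.getD (pvKey p) []) p.1) PySem.Dict.empty
  have hndA : dA.keys.Nodup :=
    PySem.Dict.nodup_keys_foldl_modify_key l pvKey [] (fun _ p => (· ++ [p.1])) PySem.Dict.empty hndE
  have hndB : dB.keys.Nodup := by rw [hKB, ← hKA]; exact hndA
  -- A's sort loop
  obtain ⟨hKeys2, hGet2⟩ := pvSortLoop dA.keys dA hndA
    (fun k hk => (PySem.Dict.contains_iff_mem_keys _ _).mpr hk)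
  set d2 := dA.keys.foldl (fun d' k => d'.insert k (PySem.List.sorted (d'.getD k []) (fun v => v) false)) dA with hd2
  have hnd2 : d2.keys.Nodup := by rw [hKeys2]; exact hndA
  rw [hA]
  dsimp only
  rw [← hd2]
  have hBfold : (l.foldl (fun d p =>
      d.insert ((PySem.Dict.ofList p.2).getD "sub_industry" "")
        (pvInsertSorted (d.getD ((PySem.Dict.ofList p.2).getD "sub_industry" "") []) p.1))
      PySem.Dict.empty) = dB := by rw [hdB]; rfl
  rw [hBfold]
  rw [PySem.Dict.items_eq_map_keys d2 hnd2 [], PySem.Dict.items_eq_map_keys dB hndB [],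
    hKeys2, hKB, ← hKA]
  apply List.map_congr_left
  intro k hk
  rw [hGet2 k, if_pos hk, pvFoldA_getD, hdB, pvFoldB_getD]
  simp [PySem.Dict.getD_empty, foldl_pvInsertSorted_eq_sorted]
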